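-- pv_equiv track=rewrite | github.com/morningred88/-data-structure-algorithms-in-python | EPI/ch5v_boolean_ordering_partition.py | rearrange_boolean_forward
-- ===== SOURCE A (Python) =====
-- from typing import List
--
-- def rearrange_boolean_forward(A:List[bool]) -> List:
--
--     # Initialize the placement position (index) of the 2 subarrays
--     false, true = 0, 0
--     for i in range(len(A)):
--         if A[i]:
--             true += 1
--         else:
--             A[true], A[false] = A[false], A[true]
--             false, true = false + 1, true + 1
--
--     return A
-- ===== SOURCE B (Python) =====
-- from typing import List
--
-- def rearrange_boolean_forward(A: List[bool]) -> List:
--     # Stable bucket partition: collect falses and trues separately, then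
--     # write them back in place (A[:] keeps the same list object mutated,
--     # matching A's in-place behaviour).
--     falses = [x for x in A if not x]
--     trues = [x for x in A if x]
--     A[:] = falses + trues
--     return A
-- ===== Notes on version B (the rewrite author's own statement) =====
-- stated objective: simpler
-- what changed: Replaces the single-pass two-pointer in-place swap with two filtering passes (falses, trues) concatenated and written back via slice assignment.
import Mathlib
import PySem

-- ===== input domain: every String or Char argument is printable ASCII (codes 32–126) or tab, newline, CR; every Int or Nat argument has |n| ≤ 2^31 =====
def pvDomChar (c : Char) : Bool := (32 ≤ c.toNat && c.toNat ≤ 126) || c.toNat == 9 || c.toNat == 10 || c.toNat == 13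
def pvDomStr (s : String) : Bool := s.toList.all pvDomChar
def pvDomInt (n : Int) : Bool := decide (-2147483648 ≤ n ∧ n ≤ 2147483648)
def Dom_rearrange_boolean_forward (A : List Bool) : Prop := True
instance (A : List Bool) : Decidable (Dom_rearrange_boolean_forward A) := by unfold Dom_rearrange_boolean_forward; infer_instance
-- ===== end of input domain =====

-- B replaces A's two-pointer in-place swap by two filtering passes concatenated;
-- both Pythons mutate the argument list in place to the same final contents, and
-- the equivalence proved here is about the RETURN value.

-- ===== PORT A =====
-- Loop body of A: state is (the list, false pointer, true pointer); the Python
-- indices i, false, true are always in range (false ≤ true = i < len(A)), so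
-- `getD … false` / `List.set` are exact here (no IndexError is reachable).
-- `A[true], A[false] = A[false], A[true]` reads both cells before either write.
def pvStepA (s : List Bool × Nat × Nat) (i : Nat) : List Bool × Nat × Nat :=
  match s with
  | (l, f, t) =>
    if l.getD i false then
      (l, f, t + 1)
    else
      ((l.set t (l.getD f false)).set f (l.getD t false), f + 1, t + 1)

def rearrange_boolean_forward (A : List Bool) : List Bool :=
  ((List.range A.length).foldl pvStepA (A, 0, 0)).1

-- ===== PORT B =====
def rearrange_boolean_forward_alt (A : List Bool) : List Bool :=
  (A.filter fun x => !x) ++ (A.filter fun x => x)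

-- ===== PRECONDITION & SPEC =====
def Spec_rearrange_boolean_forward (A : List Bool) (out : List Bool) : Prop := out = rearrange_boolean_forward_alt A
instance (A : List Bool) (out : List Bool) : Decidable (Spec_rearrange_boolean_forward A out) := by unfold Spec_rearrange_boolean_forward; infer_instance

-- ===== CLAIM (what is proved, stated in full; the proofs are below) =====
def Claim_equal_rearrange_boolean_forward : Prop := ∀ (A : List Bool), Dom_rearrange_boolean_forward A → Spec_rearrange_boolean_forward A (rearrange_boolean_forward A)

-- ===== LEMMAS AND PROOFS =====

theorem pv_getD_append_len (xs ys : List Bool) (y d : Bool) :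
    (xs ++ y :: ys).getD xs.length d = y := by
  induction xs with
  | nil => rfl
  | cons a xs ih => simp

theorem pv_set_append_len (xs ys : List Bool) (y v : Bool) :
    (xs ++ y :: ys).set xs.length v = xs ++ v :: ys := by
  induction xs with
  | nil => rfl
  | cons a xs ih => simp [ih]

-- The loop invariant of A: processing the remaining `rest` from a state whose
-- list is `f` falses, then `i - f` trues, then `rest`, partitions `rest` too.
theorem pv_loop_inv (rest : List Bool) : ∀ (f i : Nat), f ≤ i →
    (List.range' i rest.length).foldl pvStepA
      (List.replicate f false ++ (List.replicate (i - f) true ++ rest), f, i)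
    = (List.replicate (f + rest.count false) false ++
         List.replicate ((i - f) + rest.count true) true,
       f + rest.count false, i + rest.length) := by
  induction rest with
  | nil => intro f i _; simp
  | cons b rest ih =>
    intro f i hfi
    have hlen : (List.replicate f false ++ List.replicate (i - f) true : List Bool).length = i := by
      simp; omega
    simp only [List.length_cons, List.range'_succ, List.foldl_cons]
    cases b with
    | true =>
      have hguard := pv_getD_append_len (List.replicate f false ++ List.replicate (i - f) true) rest true false
      rw [hlen, List.append_assoc] at hguard
      have hstep : pvStepA (List.replicate f false ++ (List.replicate (i - f) true ++ true :: rest), f, i) i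
          = (List.replicate f false ++ (List.replicate (i - f) true ++ true :: rest), f, i + 1) := by
        simp only [pvStepA, hguard, if_true]
      rw [hstep]
      have hl : List.replicate f false ++ (List.replicate (i - f) true ++ true :: rest)
          = List.replicate f false ++ (List.replicate (i + 1 - f) true ++ rest) := by
        have h1 : i + 1 - f = (i - f) + 1 := by omega
        rw [h1, List.replicate_succ']
        simp
      rw [hl, ih f (i + 1) (by omega)]
      have c1 : f + rest.count false = f + (true :: rest).count false := by
        simp
      have c2 : (i + 1 - f) + rest.count true = (i - f) + (true :: rest).count true := by
        simp; try omega
      have c3 : i + 1 + rest.length = i + (rest.length + 1) := by omega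
      rw [c1, c2, c3]
    | false =>
      rcases Nat.lt_or_ge f i with hlt | hge
      · -- f < i : position f holds a true, position i the current false; real swap
        obtain ⟨k, hk⟩ : ∃ k, i - f = k + 1 := ⟨i - f - 1, by omega⟩
        have hlen2 : (List.replicate f false ++ List.replicate (k + 1) true : List Bool).length = i := by
          simp; omega
        have e1 : List.replicate f false ++ (List.replicate (i - f) true ++ false :: rest)
            = (List.replicate f false ++ List.replicate (k + 1) true) ++ false :: rest := by
          rw [hk, List.append_assoc]
        have hguard := pv_getD_append_len (List.replicate f false ++ List.replicate (k + 1) true) rest false false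
        rw [hlen2] at hguard
        have e2 : (List.replicate f false ++ List.replicate (k + 1) true : List Bool) ++ false :: rest
            = List.replicate f false ++ true :: (List.replicate k true ++ false :: rest) := by
          simp [List.replicate_succ]
        have hvf := pv_getD_append_len (List.replicate f false) (List.replicate k true ++ false :: rest) true false
        rw [List.length_replicate] at hvf
        rw [← e2] at hvf
        have hset1 := pv_set_append_len (List.replicate f false ++ List.replicate (k + 1) true) rest false true
        rw [hlen2] at hset1
        have e3 : (List.replicate f false ++ List.replicate (k + 1) true : List Bool) ++ true :: rest
            = List.replicate f false ++ true :: (List.replicate k true ++ true :: rest) := by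
          simp [List.replicate_succ]
        have hset2 := pv_set_append_len (List.replicate f false) (List.replicate k true ++ true :: rest) true false
        rw [List.length_replicate] at hset2
        have e4 : List.replicate f false ++ false :: (List.replicate k true ++ true :: rest)
            = List.replicate (f + 1) false ++ (List.replicate (k + 1) true ++ rest) := by
          rw [List.replicate_succ' (n := f) (a := false), List.replicate_succ' (n := k) (a := true)]
          simp
        have hstep : pvStepA (List.replicate f false ++ (List.replicate (i - f) true ++ false :: rest), f, i) i
            = (List.replicate (f + 1) false ++ (List.replicate (k + 1) true ++ rest), f + 1, i + 1) := by
          rw [e1]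
          simp only [pvStepA, hguard, Bool.false_eq_true, if_false]
          rw [hvf, hset1, e3, hset2, e4]
        rw [hstep]
        rw [show k + 1 = (i + 1) - (f + 1) by omega]
        rw [ih (f + 1) (i + 1) (by omega)]
        have c1 : f + 1 + rest.count false = f + (false :: rest).count false := by
          simp; try omega
        have c2 : ((i + 1) - (f + 1)) + rest.count true = (i - f) + (false :: rest).count true := by
          simp; try omega
        have c3 : i + 1 + rest.length = i + (rest.length + 1) := by omega
        rw [c1, c2, c3]
      · -- f = i : the true region is empty, the swap writes false back onto itself
        have hfe : f = i := by omega
        subst hfe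
        simp only [Nat.sub_self, List.replicate_zero, List.nil_append]
        have hguard := pv_getD_append_len (List.replicate f false) rest false false
        rw [List.length_replicate] at hguard
        have hset := pv_set_append_len (List.replicate f false) rest false false
        rw [List.length_replicate] at hset
        have e : List.replicate f false ++ false :: rest
            = List.replicate (f + 1) false ++ (List.replicate ((f + 1) - (f + 1)) true ++ rest) := by
          rw [List.replicate_succ' (n := f) (a := false)]
          simp
        have hstep : pvStepA (List.replicate f false ++ false :: rest, f, f) f
            = (List.replicate (f + 1) false ++ (List.replicate ((f + 1) - (f + 1)) true ++ rest), f + 1, f + 1) := by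
          simp only [pvStepA, hguard, Bool.false_eq_true, if_false]
          rw [hset, hset, e]
        rw [hstep, ih (f + 1) (f + 1) (by omega)]
        have c1 : f + 1 + rest.count false = f + (false :: rest).count false := by
          simp; try omega
        have c2 : ((f + 1) - (f + 1)) + rest.count true = (f - f) + (false :: rest).count true := by
          simp
        have c3 : f + 1 + rest.length = f + (rest.length + 1) := by omega
        rw [c1, c2, c3]
        simp

theorem pv_filter_not_eq_replicate (A : List Bool) :
    (A.filter fun x => !x) = List.replicate (A.count false) false := by
  induction A with
  | nil => rfl
  | cons a A ih => cases a <;> simp [ih, List.replicate_succ]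

theorem pv_filter_id_eq_replicate (A : List Bool) :
    (A.filter fun x => x) = List.replicate (A.count true) true := by
  induction A with
  | nil => rfl
  | cons a A ih => cases a <;> simp [ih, List.replicate_succ]

-- ===== VERDICT (by name: the statement is the Claim_ definition above) =====
theorem rearrange_boolean_forward_spec : Claim_equal_rearrange_boolean_forward := by
  intro A _
  unfold Spec_rearrange_boolean_forward rearrange_boolean_forward rearrange_boolean_forward_alt
  have h := pv_loop_inv A 0 0 (Nat.le_refl 0)
  simp only [Nat.sub_self, List.replicate_zero, List.nil_append] at h
  rw [List.range_eq_range', h]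
  simp [pv_filter_not_eq_replicate, pv_filter_id_eq_replicate]
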